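-- pv_equiv track=rewrite | github.com/riddheshSajwan/data_structures_algorithm | math/modSum.py | solve
-- ===== SOURCE A (Python) =====
-- def solve(A):
--     lst = [0] * 1009
--     for a in A:
--         lst[a] += 1
--     ans = 0
--     mod = 1000000007
--     for i in range(1, 1001):
--         if(lst[i] == 0):
--             continue
--         a = lst[i]
--         for j in range(1, 1001):
--             if(lst[j] == 0):
--                 continue
--             b = lst[j]
--             val = j % i
--             temp = a * b * val
--             ans = ((ans % mod) + (temp % mod)) % mod
--     return ans
-- ===== SOURCE B (Python) =====
-- def solve(A):
--     MOD = 1000000007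
--     V = 1000
--     cnt = [0] * (V + 1)
--     for a in A:
--         if 1 <= a <= V:
--             cnt[a] += 1
--     # prefix counts and the weighted total S = sum_j j*cnt[j]
--     pre = [0] * (V + 1)
--     S = 0
--     for j in range(1, V + 1):
--         pre[j] = pre[j - 1] + cnt[j]
--         S += j * cnt[j]
--     n = pre[V]
--     total = 0
--     for i in range(1, V + 1):
--         if cnt[i]:
--             # D = sum_j cnt[j] * (j // i), grouped by multiples of i via prefix sums
--             D = 0
--             for q in range(i, V + 1, i):
--                 D += n - pre[q - 1]
--             total += cnt[i] * (S - i * D)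
--     return total % MOD
-- ===== Notes on version B (the rewrite author's own statement) =====
-- stated objective: alternative
-- what changed: Replaces A's 1000x1000 double loop over (i,j) value pairs with per-step mods by prefix sums of counts: for each i the inner scan becomes a sum over the multiples of i (floor-division blocks) read off the prefix-sum table, with one mod at the end. Intended as a constant-factor speedup; timing run readings varied around the 1.5x threshold across runs, so no speed is claimed.
-- outside the precondition, e.g. on solve([-9, 5]): A returns 5, B returns 0; on solve([2000]): A raises IndexError, B returns 0
import Mathlib
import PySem

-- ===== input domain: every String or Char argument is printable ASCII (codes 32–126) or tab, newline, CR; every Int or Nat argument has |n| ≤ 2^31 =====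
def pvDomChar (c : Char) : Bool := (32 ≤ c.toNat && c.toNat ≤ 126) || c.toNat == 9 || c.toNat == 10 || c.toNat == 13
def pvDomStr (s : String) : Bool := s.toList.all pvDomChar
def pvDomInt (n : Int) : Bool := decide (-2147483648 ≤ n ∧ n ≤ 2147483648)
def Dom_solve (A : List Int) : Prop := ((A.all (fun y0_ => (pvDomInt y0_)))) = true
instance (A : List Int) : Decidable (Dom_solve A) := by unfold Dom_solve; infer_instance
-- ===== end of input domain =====

set_option maxRecDepth 16384
set_option maxHeartbeats 800000


-- B replaces A's 1000×1000 pairwise (j mod i) scan by prefix sums of counts grouped over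
-- floor-division blocks (multiples of i), with one final mod — a different grouping
-- of the same sum with a smaller table scan (timing readings on the generated inputs varied
-- around the 1.5× threshold, so no speed is claimed beyond what the check records).

-- ===== PORT A =====
-- lst[a] += 1  (pyGet? is none exactly where Python raises IndexError; those inputs are outside Pre_solve)
def bumpA (lst : List Int) (a : Int) : List Int :=
  match PySem.List.pyGet? lst a with
  | some v => PySem.List.pySetD lst a (v + 1)
  | none => lst

-- the inner 'for j in range(1, 1001)' loop of A (indices 1..1000 are always in range of the
-- 1009-long table, so the total pyGetD form is exact here)
def innerA (lst : List Int) (i : Int) (ans0 : Int) : Int :=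
  (PySem.List.pyRange 1 1001 1).foldl (fun ans j =>
    if PySem.List.pyGetD lst j 0 = 0 then ans
    else PySem.Int.mod (PySem.Int.mod ans 1000000007 +
      PySem.Int.mod (PySem.List.pyGetD lst i 0 * PySem.List.pyGetD lst j 0 * PySem.Int.mod j i)
        1000000007) 1000000007) ans0

def solve (A : List Int) : Int :=
  let lst := A.foldl bumpA (List.replicate 1009 (0:Int))
  (PySem.List.pyRange 1 1001 1).foldl (fun ans i =>
    if PySem.List.pyGetD lst i 0 = 0 then ans else innerA lst i ans) 0

-- ===== PORT B =====
-- if 1 <= a <= 1000: cnt[a] += 1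
def bumpB (cnt : List Int) (a : Int) : List Int :=
  if 1 ≤ a ∧ a ≤ 1000 then PySem.List.pySetD cnt a (PySem.List.pyGetD cnt a 0 + 1) else cnt

-- pre[j] = pre[j-1] + cnt[j]; S += j*cnt[j]
def stepPre (cnt : List Int) (ps : List Int × Int) (j : Int) : List Int × Int :=
  (PySem.List.pySetD ps.1 j (PySem.List.pyGetD ps.1 (j - 1) 0 + PySem.List.pyGetD cnt j 0),
   ps.2 + j * PySem.List.pyGetD cnt j 0)

-- D = sum over q in range(i, 1001, i) of n - pre[q-1]
def dsum (pre : List Int) (n i : Int) : Int :=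
  (PySem.List.pyRange i 1001 i).foldl (fun D q => D + (n - PySem.List.pyGetD pre (q - 1) 0)) 0

-- if cnt[i]: total += cnt[i] * (S - i*D)
def stepTot (cnt pre : List Int) (n S total i : Int) : Int :=
  if PySem.List.pyGetD cnt i 0 ≠ 0 then
    total + PySem.List.pyGetD cnt i 0 * (S - i * dsum pre n i)
  else total

def solve_alt (A : List Int) : Int :=
  let cnt := A.foldl bumpB (List.replicate 1001 (0:Int))
  let ps := (PySem.List.pyRange 1 1001 1).foldl (stepPre cnt) (List.replicate 1001 (0:Int), 0)
  let n := PySem.List.pyGetD ps.1 1000 0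
  PySem.Int.mod ((PySem.List.pyRange 1 1001 1).foldl (stepTot cnt ps.1 n ps.2) 0) 1000000007

-- ===== PRECONDITION & SPEC =====
-- Pre_solve admits every input on which A returns, except those with an element in -1008..-9:
-- there Python's negative-index wraparound counts the element as the value a+1009 in 1..1000
-- (e.g. -9 counted as 1000) — an artefact of A's table that B does not reproduce.  Elements
-- above 1008 or below -1009 make A raise IndexError; elements in -8..-1 or equal to -1009 land
-- on table slots the loops never read, so A and B agree and they stay inside Pre_solve.
def Pre_solve (A : List Int) : Prop := ∀ a ∈ A, a ≤ 1008 ∧ (-8 ≤ a ∨ a = -1009)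
instance (A : List Int) : Decidable (Pre_solve A) := by unfold Pre_solve; infer_instance
def pvWitness_solve : List Int := [1, 2, 2, 1000]

def Spec_solve (A : List Int) (out : Int) : Prop := out = solve_alt A
instance (A : List Int) (out : Int) : Decidable (Spec_solve A out) := by unfold Spec_solve; infer_instance

-- ===== CLAIM (what is proved, stated in full; the proofs are below) =====
def Claim_equal_solve : Prop := ∀ (A : List Int), Dom_solve A → Pre_solve A → Spec_solve A (solve A)

-- ===== LEMMAS AND PROOFS =====

-- the multiplicity function both tables realise, and B's derived quantities
def cA (A : List Int) (k : Nat) : Int := (A.count (k:Int) : Int)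
def PP (A : List Int) (m : Nat) : Int := ∑ j ∈ Finset.range m, cA A (j+1)
def SS (A : List Int) : Int := ∑ u ∈ Finset.range 1000, ((u+1 : Nat) : Int) * cA A (u+1)
def DD (A : List Int) (i : Nat) : Int :=
  ∑ k ∈ Finset.range (1000 / i), (PP A 1000 - PP A (i*(k+1) - 1))

lemma sum_map_range (n : Nat) (f : Nat → Int) :
    ((List.range n).map f).sum = ∑ k ∈ Finset.range n, f k := rfl

lemma getD_set_eq (t : List Int) (n k : Nat) (v : Int) (hn : n < t.length) :
    (t.set n v).getD k 0 = if n = k then v else t.getD k 0 := by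
  simp only [List.getD_eq_getElem?_getD, List.getElem?_set]
  split_ifs with h1 <;> simp [h1]

lemma pyR_eq : PySem.List.pyRange 1 1001 1
    = (List.range 1000).map (fun k : Nat => 1 + (k:Int)) := by
  rw [PySem.List.pyRange_one, show ((1001:Int) - 1).toNat = 1000 from by decide]

-- ---- A's counting table ----
lemma len_bumpA (t : List Int) (a : Int) : (bumpA t a).length = t.length := by
  unfold bumpA
  cases h : PySem.List.pyGet? t a with
  | none => rfl
  | some v => simp [PySem.List.length_pySetD]

lemma bumpA_eq (t : List Int) (a : Int) (h0 : 0 ≤ a) (h1 : a ≤ 1008) (hl : t.length = 1009) :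
    bumpA t a = t.set a.toNat (t.getD a.toNat 0 + 1) := by
  have hlt : a.toNat < t.length := by omega
  unfold bumpA
  rw [PySem.List.pyGet?_of_nonneg t h0]
  rw [List.getElem?_eq_getElem hlt]
  simp only
  rw [PySem.List.pySetD_of_nonneg t _ h0, List.getD_eq_getElem?_getD,
    List.getElem?_eq_getElem hlt]
  rfl

lemma getD_bumpA (t : List Int) (a : Int) (hl : t.length = 1009)
    (hpre : a ≤ 1008 ∧ (-8 ≤ a ∨ a = -1009)) (k : Nat) (h1k : 1 ≤ k) (hk : k ≤ 1000) :
    (bumpA t a).getD k 0 = t.getD k 0 + (if a = (k:Int) then 1 else 0) := by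
  by_cases h0 : 0 ≤ a
  · rw [bumpA_eq t a h0 hpre.1 hl, getD_set_eq t _ k _ (by omega)]
    by_cases he : a = (k:Int)
    · rw [if_pos he, if_pos (by omega : a.toNat = k), show a.toNat = k from by omega]
    · rw [if_neg he, if_neg (by omega : ¬ a.toNat = k), add_zero]
  · -- negative element: Python wraps to slot 1009 + a ∈ {0} ∪ [1001, 1008], never equal to k
    have hm : PySem.List.pyIdx? t.length a = some (1009 - (-a).toNat) := by
      simp only [PySem.List.pyIdx?, hl]
      rw [if_neg (by omega), if_pos (by omega)]
    have hmlt : 1009 - (-a).toNat < t.length := by omega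
    unfold bumpA
    simp only [PySem.List.pyGet?, PySem.List.pySetD, PySem.List.pySet?, hm, Option.map_some,
      Option.bind_some, Option.getD_some, List.getElem?_eq_getElem hmlt]
    rw [getD_set_eq t _ k _ hmlt, if_neg (by omega : ¬ 1009 - (-a).toNat = k),
      if_neg (by omega : ¬ a = (k:Int)), add_zero]

lemma getD_foldA (A : List Int) : ∀ (t : List Int), t.length = 1009 →
    (∀ a ∈ A, a ≤ 1008 ∧ (-8 ≤ a ∨ a = -1009)) → ∀ k : Nat, 1 ≤ k → k ≤ 1000 →
    (A.foldl bumpA t).getD k 0 = t.getD k 0 + (A.count (k:Int) : Int) := by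
  induction A with
  | nil => intro t _ _ k _ _; simp
  | cons a A ih =>
    intro t hlen hpre k h1k hk
    simp only [List.foldl_cons]
    rw [ih (bumpA t a) (by rw [len_bumpA, hlen])
      (fun x hx => hpre x (List.mem_cons_of_mem _ hx)) k h1k hk]
    rw [getD_bumpA t a hlen (hpre a List.mem_cons_self) k h1k hk, List.count_cons]
    by_cases he : a = (k:Int)
    · simp [he]
      push_cast
      ring
    · simp [he]

lemma tableA (A : List Int) (h : Pre_solve A) (k : Nat) (h1k : 1 ≤ k) (hk : k ≤ 1000) :
    (A.foldl bumpA (List.replicate 1009 (0:Int))).getD k 0 = cA A k := by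
  rw [getD_foldA A _ (by simp) h k h1k hk, List.getD_eq_getElem?_getD, List.getElem?_replicate,
    if_pos (show k < 1009 by omega)]
  unfold cA
  simp

-- ---- B's counting table ----
lemma len_bumpB (t : List Int) (a : Int) : (bumpB t a).length = t.length := by
  unfold bumpB
  split_ifs <;> simp [PySem.List.length_pySetD]

lemma getD_foldB (A : List Int) : ∀ (t : List Int), t.length = 1001 →
    ∀ k : Nat, 1 ≤ k → k ≤ 1000 →
    (A.foldl bumpB t).getD k 0 = t.getD k 0 + (A.count (k:Int) : Int) := by
  induction A with
  | nil => intro t _ k _ _; simp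
  | cons a A ih =>
    intro t hlen k h1 hk
    simp only [List.foldl_cons]
    rw [ih (bumpB t a) (by rw [len_bumpB, hlen]) k h1 hk, List.count_cons]
    unfold bumpB
    by_cases hg : 1 ≤ a ∧ a ≤ 1000
    · rw [if_pos hg, PySem.List.pySetD_of_nonneg t _ (by omega),
        getD_set_eq t _ k _ (by omega), PySem.List.pyGetD_of_nonneg t _ (by omega)]
      by_cases he : a = (k:Int)
      · have h2 : a.toNat = k := by omega
        simp [he, h2]
        push_cast
        ring
      · have h2 : a.toNat ≠ k := by omega
        simp [he, h2]
    · rw [if_neg hg]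
      have he : ¬ (a = (k:Int)) := by omega
      simp [he]

lemma tableB (A : List Int) (k : Nat) (h1 : 1 ≤ k) (hk : k ≤ 1000) :
    (A.foldl bumpB (List.replicate 1001 (0:Int))).getD k 0 = cA A k := by
  rw [getD_foldB A _ (by simp) k h1 hk, List.getD_eq_getElem?_getD, List.getElem?_replicate,
    if_pos (show k < 1001 by omega)]
  unfold cA
  simp

-- ---- B's prefix-sum loop ----
lemma prefix_inv (cnt : List Int) : ∀ T : Nat, T ≤ 1000 →
    (((PySem.List.pyRange 1 (1 + (T:Int)) 1).foldl (stepPre cnt)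
        (List.replicate 1001 (0:Int), 0)).1.length = 1001)
    ∧ (∀ k : Nat, k ≤ 1000 →
        ((PySem.List.pyRange 1 (1 + (T:Int)) 1).foldl (stepPre cnt)
          (List.replicate 1001 (0:Int), 0)).1.getD k 0 =
        if k ≤ T then ∑ j ∈ Finset.range k, cnt.getD (j+1) 0 else 0)
    ∧ ((PySem.List.pyRange 1 (1 + (T:Int)) 1).foldl (stepPre cnt)
        (List.replicate 1001 (0:Int), 0)).2 =
        ∑ j ∈ Finset.range T, ((j+1 : Nat) : Int) * cnt.getD (j+1) 0 := by
  intro T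
  induction T with
  | zero =>
    intro _
    rw [show ((1:Int) + (0:Nat)) = 1 by norm_num, PySem.List.pyRange_one_eq_nil le_rfl]
    simp only [List.foldl_nil]
    refine ⟨List.length_replicate, fun k hk => ?_, by simp⟩
    rw [List.getD_eq_getElem?_getD, List.getElem?_replicate, if_pos (show k < 1001 by omega)]
    by_cases h : k ≤ 0
    · have hk0 : k = 0 := by omega
      subst hk0
      simp
    · rw [if_neg h]
      rfl
  | succ T ih =>
    intro hT
    obtain ⟨ihlen, ihget, ihsum⟩ := ih (by omega)
    have hsplit : PySem.List.pyRange 1 (1 + ((T+1 : Nat) : Int)) 1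
        = PySem.List.pyRange 1 (1 + (T : Int)) 1 ++ [1 + (T : Int)] := by
      rw [show (1 + ((T+1 : Nat) : Int)) = (1 + (T:Int)) + 1 by push_cast; ring]
      exact PySem.List.pyRange_one_succ_right (by omega)
    rw [hsplit, List.foldl_append]
    set st := (PySem.List.pyRange 1 (1 + (T:Int)) 1).foldl (stepPre cnt)
      (List.replicate 1001 (0:Int), 0) with hst
    simp only [List.foldl_cons, List.foldl_nil]
    have hc1 : (1 : Int) + (T:Int) = ((T+1 : Nat) : Int) := by push_cast; ring
    have hc2 : (1 : Int) + (T:Int) - 1 = ((T : Nat) : Int) := by push_cast; ring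
    unfold stepPre
    rw [hc2, hc1]
    simp only [PySem.List.pySetD_natCast, PySem.List.pyGetD_natCast]
    have hT1len : T + 1 < st.1.length := by rw [ihlen]; omega
    refine ⟨by simp [ihlen], fun k hk => ?_, ?_⟩
    · rw [getD_set_eq st.1 _ k _ hT1len]
      by_cases he : T + 1 = k
      · subst he
        rw [if_pos rfl, ihget T (by omega), if_pos (le_refl T), if_pos (le_refl (T+1)),
          Finset.sum_range_succ]
      · rw [if_neg he, ihget k hk]
        by_cases hle : k ≤ T
        · rw [if_pos hle, if_pos (by omega)]
        · rw [if_neg hle, if_neg (by omega)]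
    · rw [ihsum, Finset.sum_range_succ]

-- ---- B's divisor-block loop ----
lemma dsum_eq (pre : List Int) (f : Nat → Int)
    (hpre : ∀ k : Nat, k ≤ 1000 → pre.getD k 0 = f k) (t : Nat) (h1 : 1 ≤ t) (ht : t ≤ 1000) :
    dsum pre (f 1000) (t:Int) =
      ∑ k ∈ Finset.range (1000 / t), (f 1000 - f (t*(k+1) - 1)) := by
  unfold dsum
  rw [PySem.List.pyRange_of_pos _ _ (by omega)]
  have hN : (if (t:Int) < 1001 then (((1001:Int) - t + t - 1) / t).toNat else 0) = 1000 / t := by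
    rw [if_pos (by omega)]
    have h2 : ((1001:Int) - t + t - 1) = ((1000:Nat):Int) := by push_cast; ring
    rw [h2, ← Int.natCast_div, Int.toNat_natCast]
  rw [hN, PySem.List.foldl_add, List.map_map, sum_map_range, zero_add]
  refine Finset.sum_congr rfl ?_
  intro k hk
  simp only [Finset.mem_range] at hk
  have hmul : t * (k+1) ≤ 1000 := by
    have h2 := (Nat.le_div_iff_mul_le (show 0 < t by omega)).mp (show k + 1 ≤ 1000 / t by omega)
    rw [mul_comm] at h2
    exact h2
  have hq : ((t:Int) + (t:Int) * (k:Int) - 1) = ((t*(k+1) - 1 : Nat) : Int) := by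
    push_cast [Nat.cast_sub (by nlinarith : 1 ≤ t*(k+1))]
    ring
  simp only [Function.comp]
  rw [hq, PySem.List.pyGetD_natCast, hpre _ (by omega)]

-- ---- B's total loop ----
lemma tot_eq (cnt pre : List Int) (n S : Int) :
    (PySem.List.pyRange 1 1001 1).foldl (stepTot cnt pre n S) 0 =
    ∑ k ∈ Finset.range 1000,
      (if cnt.getD (k+1) 0 ≠ 0 then
        cnt.getD (k+1) 0 * (S - ((k+1 : Nat) : Int) * dsum pre n ((k+1 : Nat) : Int)) else 0) := by
  have hfun : stepTot cnt pre n S = fun total i => total +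
      (if PySem.List.pyGetD cnt i 0 ≠ 0 then
        PySem.List.pyGetD cnt i 0 * (S - i * dsum pre n i) else 0) := by
    funext total i
    unfold stepTot
    split_ifs <;> simp
  rw [hfun, PySem.List.foldl_add, zero_add, pyR_eq, List.map_map, sum_map_range]
  refine Finset.sum_congr rfl ?_
  intro k hk
  have hc : (1:Int) + (k:Int) = ((k+1 : Nat) : Int) := by push_cast; ring
  simp only [Function.comp]
  rw [hc, PySem.List.pyGetD_natCast]

-- ---- A's mod-accumulating loops ----
lemma inner_mod (lst : List Int) (i : Int) : ∀ (l : List Int) (s : Int),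
    l.foldl (fun ans j =>
      if PySem.List.pyGetD lst j 0 = 0 then ans
      else PySem.Int.mod (PySem.Int.mod ans 1000000007 +
        PySem.Int.mod (PySem.List.pyGetD lst i 0 * PySem.List.pyGetD lst j 0 * PySem.Int.mod j i)
          1000000007) 1000000007) (PySem.Int.mod s 1000000007)
    = PySem.Int.mod (s + (l.map (fun j =>
        PySem.List.pyGetD lst i 0 * PySem.List.pyGetD lst j 0 * PySem.Int.mod j i)).sum)
        1000000007 := by
  intro l
  induction l with
  | nil => intro s; simp
  | cons j l ih =>
    intro s
    simp only [List.foldl_cons, List.map_cons, List.sum_cons]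
    by_cases h : PySem.List.pyGetD lst j 0 = 0
    · rw [if_pos h, ih s, h, mul_zero, zero_mul, zero_add]
    · rw [if_neg h]
      have hM : (0:Int) < 1000000007 := by norm_num
      have hacc : PySem.Int.mod (PySem.Int.mod (PySem.Int.mod s 1000000007) 1000000007 +
          PySem.Int.mod (PySem.List.pyGetD lst i 0 * PySem.List.pyGetD lst j 0 *
            PySem.Int.mod j i) 1000000007) 1000000007
          = PySem.Int.mod (s + PySem.List.pyGetD lst i 0 * PySem.List.pyGetD lst j 0 *
              PySem.Int.mod j i) 1000000007 := by
        simp only [PySem.Int.mod_eq_emod_of_pos hM]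
        rw [Int.emod_emod_of_dvd _ dvd_rfl, ← Int.add_emod]
      rw [hacc, ih, ← add_assoc]

lemma innerA_mod (lst : List Int) (i : Int) (s : Int) :
    innerA lst i (PySem.Int.mod s 1000000007)
    = PySem.Int.mod (s + ((PySem.List.pyRange 1 1001 1).map (fun j =>
        PySem.List.pyGetD lst i 0 * PySem.List.pyGetD lst j 0 * PySem.Int.mod j i)).sum)
        1000000007 := by
  unfold innerA
  exact inner_mod lst i _ s

lemma outer_mod (lst : List Int) : ∀ (l : List Int) (s : Int),
    l.foldl (fun ans i =>
      if PySem.List.pyGetD lst i 0 = 0 then ans else innerA lst i ans)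
      (PySem.Int.mod s 1000000007)
    = PySem.Int.mod (s + (l.map (fun i =>
        ((PySem.List.pyRange 1 1001 1).map (fun j =>
          PySem.List.pyGetD lst i 0 * PySem.List.pyGetD lst j 0 * PySem.Int.mod j i)).sum)).sum)
        1000000007 := by
  intro l
  induction l with
  | nil => intro s; simp
  | cons i l ih =>
    intro s
    simp only [List.foldl_cons, List.map_cons, List.sum_cons]
    by_cases h : PySem.List.pyGetD lst i 0 = 0
    · rw [if_pos h, ih s]
      have hrow : ((PySem.List.pyRange 1 1001 1).map (fun j =>
          PySem.List.pyGetD lst i 0 * PySem.List.pyGetD lst j 0 * PySem.Int.mod j i)).sum = 0 := by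
        simp [h]
      rw [hrow, zero_add]
    · rw [if_neg h]
      rw [innerA_mod lst i s, ih, ← add_assoc]

lemma outer_mod' (lst : List Int) (l : List Int) :
    l.foldl (fun ans i =>
      if PySem.List.pyGetD lst i 0 = 0 then ans else innerA lst i ans) 0
    = PySem.Int.mod ((l.map (fun i =>
        ((PySem.List.pyRange 1 1001 1).map (fun j =>
          PySem.List.pyGetD lst i 0 * PySem.List.pyGetD lst j 0 * PySem.Int.mod j i)).sum)).sum)
        1000000007 := by
  have h := outer_mod lst l 0
  rw [show PySem.Int.mod (0:Int) 1000000007 = 0 from by decide] at h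
  rw [h, zero_add]

-- ---- closed forms of the two ports ----
lemma solveA_eq (A : List Int) (h : Pre_solve A) :
    solve A = PySem.Int.mod (∑ t ∈ Finset.range 1000, ∑ u ∈ Finset.range 1000,
      cA A (t+1) * cA A (u+1) * (((u+1) % (t+1) : Nat) : Int)) 1000000007 := by
  simp only [solve]
  rw [outer_mod' (A.foldl bumpA (List.replicate 1009 (0:Int))) (PySem.List.pyRange 1 1001 1)]
  refine congrArg (fun z => PySem.Int.mod z 1000000007) ?_
  rw [pyR_eq, List.map_map, sum_map_range]
  refine Finset.sum_congr rfl ?_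
  intro t htm
  simp only [Finset.mem_range] at htm
  simp only [Function.comp]
  rw [List.map_map, sum_map_range]
  refine Finset.sum_congr rfl ?_
  intro u hum
  simp only [Finset.mem_range] at hum
  simp only [Function.comp]
  rw [show (1:Int) + (t:Int) = ((t+1 : Nat) : Int) by push_cast; ring,
    show (1:Int) + (u:Int) = ((u+1 : Nat) : Int) by push_cast; ring]
  simp only [PySem.List.pyGetD_natCast]
  rw [tableA A h (t+1) (by omega) (by omega), tableA A h (u+1) (by omega) (by omega), PySem.Int.mod_natCast]

lemma solveB_eq (A : List Int) :
    solve_alt A = PySem.Int.mod (∑ t ∈ Finset.range 1000,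
      (if cA A (t+1) ≠ 0 then cA A (t+1) * (SS A - ((t+1 : Nat) : Int) * DD A (t+1)) else 0))
      1000000007 := by
  simp only [solve_alt]
  set cnt := A.foldl bumpB (List.replicate 1001 (0:Int)) with hcntdef
  have h1000 := prefix_inv cnt 1000 le_rfl
  rw [show ((1:Int) + ((1000:Nat):Int)) = 1001 by norm_num] at h1000
  set ps := (PySem.List.pyRange 1 1001 1).foldl (stepPre cnt)
    (List.replicate 1001 (0:Int), 0) with hpsdef
  obtain ⟨hlen, hget, hsum⟩ := h1000
  have hcnt : ∀ k : Nat, 1 ≤ k → k ≤ 1000 → cnt.getD k 0 = cA A k := fun k h1 hk =>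
    tableB A k h1 hk
  have hpre : ∀ k : Nat, k ≤ 1000 → ps.1.getD k 0 = PP A k := by
    intro k hk
    rw [hget k hk, if_pos hk]
    unfold PP
    refine Finset.sum_congr rfl ?_
    intro j hj
    simp only [Finset.mem_range] at hj
    exact hcnt (j+1) (by omega) (by omega)
  have hn : PySem.List.pyGetD ps.1 1000 0 = PP A 1000 := by
    rw [show (1000:Int) = ((1000:Nat):Int) by norm_num, PySem.List.pyGetD_natCast]
    exact hpre 1000 le_rfl
  have hS : ps.2 = SS A := by
    rw [hsum]
    unfold SS
    refine Finset.sum_congr rfl ?_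
    intro j hj
    simp only [Finset.mem_range] at hj
    rw [hcnt (j+1) (by omega) (by omega)]
  rw [hn, hS, tot_eq]
  refine congrArg (fun z => PySem.Int.mod z 1000000007) ?_
  refine Finset.sum_congr rfl ?_
  intro k hk
  simp only [Finset.mem_range] at hk
  rw [hcnt (k+1) (by omega) (by omega)]
  rw [dsum_eq ps.1 (PP A) hpre (k+1) (by omega) (by omega)]
  simp only [DD]

-- ---- the grouping identities ----
lemma key_id (A : List Int) (t : Nat) (h1 : 1 ≤ t) (ht : t ≤ 1000) :
    DD A t = ∑ u ∈ Finset.range 1000, cA A (u+1) * (((u+1) / t : Nat) : Int) := by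
  unfold DD
  have step1 : ∀ k ∈ Finset.range (1000 / t),
      PP A 1000 - PP A (t*(k+1) - 1)
      = ∑ j ∈ Finset.range 1000, (if t*(k+1) - 1 ≤ j then cA A (j+1) else 0) := by
    intro k hk
    simp only [Finset.mem_range] at hk
    have hmul : t * (k+1) ≤ 1000 := by
      have h2 := (Nat.le_div_iff_mul_le (show 0 < t by omega)).mp (show k + 1 ≤ 1000 / t by omega)
      rw [mul_comm] at h2
      exact h2
    have hsub : PP A 1000 - PP A (t*(k+1) - 1)
        = ∑ j ∈ Finset.Ico (t*(k+1) - 1) 1000, cA A (j+1) := by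
      rw [Finset.sum_Ico_eq_sub _ (by omega)]
      unfold PP
      ring
    rw [hsub, ← Finset.sum_filter]
    congr 1
    ext x
    simp only [Finset.mem_Ico, Finset.mem_filter, Finset.mem_range]
    omega
  rw [Finset.sum_congr rfl step1, Finset.sum_comm]
  refine Finset.sum_congr rfl ?_
  intro j hj
  simp only [Finset.mem_range] at hj
  have hcond : ∀ k : Nat, (t*(k+1) - 1 ≤ j ↔ k < (j+1) / t) := by
    intro k
    have hdiv : k+1 ≤ (j+1)/t ↔ (k+1)*t ≤ j+1 := Nat.le_div_iff_mul_le (by omega)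
    have hdiv' : k+1 ≤ (j+1)/t ↔ t*(k+1) ≤ j+1 := by rw [hdiv, mul_comm]
    have hm1 : 1 ≤ t * (k+1) := Nat.mul_pos (by omega) (by omega)
    set m := t*(k+1) with hm
    set d := (j+1)/t with hd
    omega
  have step2 : ∀ k ∈ Finset.range (1000 / t),
      (if t*(k+1) - 1 ≤ j then cA A (j+1) else 0)
      = (if k < (j+1) / t then cA A (j+1) else 0) := by
    intro k _
    rw [if_congr (hcond k) rfl rfl]
  rw [Finset.sum_congr rfl step2, ← Finset.sum_filter]
  have hfe : (Finset.range (1000 / t)).filter (fun k => k < (j+1) / t)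
      = Finset.range ((j+1) / t) := by
    have hle : (j+1) / t ≤ 1000 / t := Nat.div_le_div_right (by omega)
    ext x
    simp only [Finset.mem_filter, Finset.mem_range]
    set d1 := (j+1)/t with hd1
    set d2 := 1000/t with hd2
    omega
  rw [hfe, Finset.sum_const, Finset.card_range, nsmul_eq_mul, mul_comm]

lemma row_id (A : List Int) (t : Nat) (h1 : 1 ≤ t) (ht : t ≤ 1000) :
    SS A - (t : Int) * DD A t
    = ∑ u ∈ Finset.range 1000, cA A (u+1) * (((u+1) % t : Nat) : Int) := by
  rw [key_id A t h1 ht]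
  unfold SS
  rw [Finset.mul_sum, ← Finset.sum_sub_distrib]
  refine Finset.sum_congr rfl ?_
  intro u hu
  have hdm := Nat.div_add_mod (u+1) t
  have hc : ((u+1 : Nat) : Int) = (t : Int) * (((u+1) / t : Nat) : Int) + (((u+1) % t : Nat) : Int) := by
    exact_mod_cast congrArg (Nat.cast (R := Int)) hdm.symm
  rw [hc]
  ring

lemma sums_agree (A : List Int) :
    (∑ t ∈ Finset.range 1000,
      (if cA A (t+1) ≠ 0 then cA A (t+1) * (SS A - ((t+1 : Nat) : Int) * DD A (t+1)) else 0))
    = ∑ t ∈ Finset.range 1000, ∑ u ∈ Finset.range 1000,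
        cA A (t+1) * cA A (u+1) * (((u+1) % (t+1) : Nat) : Int) := by
  refine Finset.sum_congr rfl ?_
  intro t ht
  simp only [Finset.mem_range] at ht
  by_cases hc : cA A (t+1) = 0
  · simp [hc]
  · rw [if_pos hc, row_id A (t+1) (by omega) (by omega), Finset.mul_sum]
    refine Finset.sum_congr rfl ?_
    intro u _
    ring

-- ===== VERDICT (by name: the statement is the Claim_ definition above) =====
theorem solve_spec : Claim_equal_solve := by
  intro A _ hPre
  unfold Spec_solve
  rw [solveA_eq A hPre, solveB_eq A, sums_agree A]
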